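-- pv_equiv track=rewrite | github.com/Sonu-Suman/codeforces_7243 | math/python/15_Buy_shovel/v2.py | solve
-- ===== SOURCE A (Python) =====
-- def solve(s):
--     k = []
--
--     l = [str(s[0]*i) for i in range(1, 10)]
--
--     for i in range(len(l)):
--         if i==(len(l)-1):
--             if s[1]>=int(l[i][-1]):
--                 k.append(i+1)
--         else:
--             if int(l[i][-1])<s[1]: # and int(l[i+1][-1])>s[1]:
--                 k.append(i+1)
--
--         if int(l[i][-1])==s[1]:
--             return i+1
--
--
--     return min(k)
-- ===== SOURCE B (Python) =====
-- def _inv(u, step):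
--     # modular inverse of u mod step (step in {1,2,5,10}; u coprime to step)
--     return next(v for v in range(step) if u * v % step == 1 % step)
--
--
-- def solve(s):
--     a, r = s[0], s[1]
--     m = abs(a) % 10
--     g = (10, 1, 2, 1, 2, 5, 2, 1, 2, 1)[m]   # gcd(m, 10)
--     step = 10 // g                            # period of the last-digit cycle
--     inv = _inv(m // g % step, step)
--
--     def count_for(t):
--         # smallest k >= 1 with last digit of a*k equal to t (t a multiple of g)
--         k0 = (t // g) * inv % step
--         return k0 if k0 else step
--
--     if 0 <= r < 10 and r % g == 0:
--         k = count_for(r)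
--         if k <= 9:
--             return k
--     return min(count_for(t) for t in range(0, min(r, 10), g))
-- ===== Notes on version B (the rewrite author's own statement) =====
-- stated objective: alternative
-- what changed: Instead of A's scan over the nine multipliers with string last-digit extraction and a candidate accumulator, B solves the linear congruence m*k = t (mod 10) directly: it takes gcd(|a|%10,10) from a table, computes a modular inverse, derives the exact-match count in closed form, and otherwise minimizes the closed-form count over the at-most-five achievable target digits below r.
-- outside the precondition, e.g. on solve([]): A raises IndexError, B raises IndexError; on solve([0]): A raises IndexError, B raises IndexError; on solve([1]): A raises IndexError, B raises IndexError
import Mathlib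
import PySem

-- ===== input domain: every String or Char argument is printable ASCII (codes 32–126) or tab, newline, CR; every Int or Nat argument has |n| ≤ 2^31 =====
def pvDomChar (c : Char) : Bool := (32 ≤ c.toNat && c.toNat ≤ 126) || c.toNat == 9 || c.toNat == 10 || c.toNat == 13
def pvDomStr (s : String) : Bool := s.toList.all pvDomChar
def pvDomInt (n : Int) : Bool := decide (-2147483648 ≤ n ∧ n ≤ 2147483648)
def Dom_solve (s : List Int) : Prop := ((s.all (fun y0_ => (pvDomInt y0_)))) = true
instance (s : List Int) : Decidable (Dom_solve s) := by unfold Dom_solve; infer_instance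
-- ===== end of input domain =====

-- B replaces A's string-based scan over the nine multipliers by number theory: it solves the
-- linear congruence m*k ≡ t (mod 10) with a gcd table and a modular inverse, looping (if at
-- all) over the at-most-five achievable target digits instead of the multipliers; objective:
-- alternative algorithm, same asymptotic cost.

-- ===== PORT A =====
-- int(t[-1]) for a string t: t[-1] is PySem.Str.pyGet? t (-1) (none = IndexError, unreachable
-- here since str(n) is never empty), int(single char) is PySem.Int.ofChars?.
def lastDigitOfStr (t : String) : Int :=
  match PySem.Str.pyGet? t (-1) with
  | some c => (PySem.Int.ofChars? [c]).getD 0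
  | none => 0

def solve (s : List Int) : Int :=
  let s0 := (PySem.List.pyGet? s 0).getD 0
  let s1 := (PySem.List.pyGet? s 1).getD 0
  let l := (PySem.List.pyRange 1 10 1).map (fun i => PySem.Int.toStr (s0 * i))
  let res := (PySem.List.pyRange 0 (l.length : Int) 1).foldl
    (fun (st : List Int × Option Int) i =>
      match st with
      | (k, some r) => (k, some r)
      | (k, none) =>
        let li := (PySem.List.pyGet? l i).getD ""
        let k := if i = (l.length : Int) - 1 then
                   (if s1 ≥ lastDigitOfStr li then k ++ [i + 1] else k)
                 else (if lastDigitOfStr li < s1 then k ++ [i + 1] else k)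
        if lastDigitOfStr li = s1 then (k, some (i + 1)) else (k, none))
    ([], none)
  match res.2 with
  | some r => r
  | none => (PySem.List.min? res.1 (fun x => x)).getD 0

-- ===== PORT B =====
-- _inv(u, step): next(v for v in range(step) if u*v % step == 1 % step); the generator is
-- never exhausted on the admitted inputs, so the .getD 0 (StopIteration) is unreachable.
def invHelper (u step : Int) : Int :=
  ((PySem.List.pyRange 0 step 1).find?
    (fun v => PySem.Int.mod (u * v) step == PySem.Int.mod 1 step)).getD 0

def solve_alt (s : List Int) : Int :=
  let a := (PySem.List.pyGet? s 0).getD 0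
  let r := (PySem.List.pyGet? s 1).getD 0
  let m := PySem.Int.mod |a| 10
  let g := (PySem.List.pyGet? [10, 1, 2, 1, 2, 5, 2, 1, 2, 1] m).getD 0
  let step := PySem.Int.floordiv 10 g
  let inv := invHelper (PySem.Int.mod (PySem.Int.floordiv m g) step) step
  let countFor := fun (t : Int) =>
    let k0 := PySem.Int.mod (PySem.Int.floordiv t g * inv) step
    if k0 ≠ 0 then k0 else step
  let fallback :=
    (PySem.List.min? ((PySem.List.pyRange 0 (min r 10) g).map countFor) (fun x => x)).getD 0
  if (0 ≤ r ∧ r < 10) ∧ PySem.Int.mod r g = 0 then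
    let k := countFor r
    if k ≤ 9 then k else fallback
  else fallback

-- ===== PRECONDITION & SPEC =====
-- Pre excludes exactly the inputs on which the Python A raises: lists shorter than 2
-- (IndexError on s[1]) and inputs where no count 1..9 works — s[1] < 0, or s[1] = 0 with
-- s[0] coprime to 10 — where min([]) raises ValueError (B raises the same way there).
def Pre_solve (s : List Int) : Prop :=
  2 ≤ s.length ∧
    (0 < (PySem.List.pyGet? s 1).getD 0 ∨
      ((PySem.List.pyGet? s 1).getD 0 = 0 ∧
        ((PySem.List.pyGet? s 0).getD 0 % 2 = 0 ∨ (PySem.List.pyGet? s 0).getD 0 % 5 = 0)))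
instance (s : List Int) : Decidable (Pre_solve s) := by unfold Pre_solve; infer_instance
def pvWitness_solve : List Int := [3, 7]
def Spec_solve (s : List Int) (out : Int) : Prop := out = solve_alt s
instance (s : List Int) (out : Int) : Decidable (Spec_solve s out) := by unfold Spec_solve; infer_instance

-- ===== CLAIM =====
def Claim_equal_solve : Prop := ∀ (s : List Int), Dom_solve s → Pre_solve s → Spec_solve s (solve s)

-- ===== LEMMAS AND PROOFS =====
theorem tdc_append (b : Nat) : ∀ (f n : Nat) (ds : List Char),
    Nat.toDigitsCore b f n ds = Nat.toDigitsCore b f n [] ++ ds := by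
  intro f
  induction f with
  | zero => intro n ds; simp [Nat.toDigitsCore]
  | succ f ih =>
    intro n ds
    simp only [Nat.toDigitsCore]
    split
    · rfl
    · rw [ih (n / b) _, ih (n / b) [_], List.append_assoc]; rfl

theorem last_toDigits (m : Nat) : (Nat.toDigits 10 m).getLast? = some (Nat.digitChar (m % 10)) := by
  unfold Nat.toDigits
  simp only [Nat.toDigitsCore]
  split
  · rfl
  · rw [tdc_append]; simp

theorem ofChars_digitChar (d : Nat) (hd : d < 10) :
    PySem.Int.ofChars? [Nat.digitChar d] = some (d : Int) := by
  interval_cases d <;> decide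

theorem lastDigit_toStr (n : Int) :
    lastDigitOfStr (PySem.Int.toStr n) = ((n.natAbs % 10 : Nat) : Int) := by
  have hlast : (PySem.Int.toChars n).getLast? = some (Nat.digitChar (n.natAbs % 10)) := by
    unfold PySem.Int.toChars
    split
    · have h2 := last_toDigits n.natAbs
      revert h2
      cases hx : Nat.toDigits 10 n.natAbs with
      | nil => intro h; simp at h
      | cons x xs => intro h; rw [List.getLast?_cons_cons]; exact h
    · rename_i hnn
      have he : n.toNat = n.natAbs := by omega
      rw [he]; exact last_toDigits n.natAbs
  unfold lastDigitOfStr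
  rw [show PySem.Str.pyGet? (PySem.Int.toStr n) (-1) = (PySem.Int.toChars n).getLast? from ?_]
  · rw [hlast]
    simp [ofChars_digitChar _ (Nat.mod_lt _ (by norm_num))]
  · rw [PySem.Str.pyGet?_eq, PySem.Int.toList_toStr, PySem.Chars.pyGet?_eq_listPyGet?]
    exact PySem.List.pyGet?_neg_one _

theorem solve_big (a r : Int) (hbig : 10 ≤ r) : solve [a, r] = 1 := by
  have h0 : (PySem.List.pyGet? [a, r] 0).getD 0 = a := by
    simp [PySem.List.pyGet?, PySem.List.pyIdx?]
  have h1 : (PySem.List.pyGet? [a, r] 1).getD 0 = r := by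
    simp [PySem.List.pyGet?, PySem.List.pyIdx?]
  unfold solve
  rw [h0, h1]
  rw [show PySem.List.pyRange 1 10 1 = [1,2,3,4,5,6,7,8,9] from by decide]
  simp only [List.map_cons, List.map_nil, List.length_cons, List.length_nil]
  norm_num [PySem.List.pyGet?, PySem.List.pyIdx?]
  rw [show PySem.List.pyRange 0 9 1 = [0,1,2,3,4,5,6,7,8] from by decide]
  simp only [List.foldl_cons, List.foldl_nil]
  have hne : ∀ y : Int, (lastDigitOfStr (PySem.Int.toStr y) = r) = False := by
    intro y
    rw [lastDigit_toStr]
    simp only [eq_iff_iff, iff_false]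
    have := Nat.mod_lt y.natAbs (y := 10) (by norm_num)
    omega
  have hlt : ∀ y : Int, (lastDigitOfStr (PySem.Int.toStr y) < r) = True := by
    intro y
    rw [lastDigit_toStr]
    simp only [eq_iff_iff, iff_true]
    have := Nat.mod_lt y.natAbs (y := 10) (by norm_num)
    omega
  have hle : ∀ y : Int, (r ≥ lastDigitOfStr (PySem.Int.toStr y)) = True := by
    intro y
    rw [lastDigit_toStr]
    simp only [ge_iff_le, eq_iff_iff, iff_true]
    have := Nat.mod_lt y.natAbs (y := 10) (by norm_num)
    omega
  simp [hne, hlt, hle]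
  decide

theorem solve_alt_big (a r : Int) (hbig : 10 ≤ r) : solve_alt [a, r] = 1 := by
  have h0 : (PySem.List.pyGet? [a, r] 0).getD 0 = a := by
    simp [PySem.List.pyGet?, PySem.List.pyIdx?]
  have h1 : (PySem.List.pyGet? [a, r] 1).getD 0 = r := by
    simp [PySem.List.pyGet?, PySem.List.pyIdx?]
  unfold solve_alt
  rw [h0, h1]
  dsimp only
  rw [min_eq_right hbig]
  rw [if_neg (by intro h; omega)]
  rw [PySem.Int.mod_eq_emod_of_pos (by norm_num : (0:Int) < 10)]
  generalize hq : |a| % 10 = q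
  have hq0 : 0 ≤ q := hq ▸ Int.emod_nonneg _ (by norm_num)
  have hq9 : q < 10 := hq ▸ Int.emod_lt_of_pos _ (by norm_num)
  interval_cases q <;> decide

theorem main_core (a r : Int) (hr0 : 0 ≤ r) (hr9 : r < 10) :
    solve [a, r] = solve_alt [a, r] := by
  have h0 : (PySem.List.pyGet? [a, r] 0).getD 0 = a := by
    simp [PySem.List.pyGet?, PySem.List.pyIdx?]
  have h1 : (PySem.List.pyGet? [a, r] 1).getD 0 = r := by
    simp [PySem.List.pyGet?, PySem.List.pyIdx?]
  unfold solve solve_alt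
  rw [h0, h1]
  dsimp only
  rw [PySem.Int.mod_eq_emod_of_pos (by norm_num : (0:Int) < 10)]
  rw [show PySem.List.pyRange 1 10 1 = [1,2,3,4,5,6,7,8,9] from by decide]
  simp only [List.map_cons, List.map_nil, List.length_cons, List.length_nil]
  norm_num [PySem.List.pyGet?, PySem.List.pyIdx?]
  rw [show PySem.List.pyRange 0 9 1 = [0,1,2,3,4,5,6,7,8] from by decide]
  simp only [List.foldl_cons, List.foldl_nil]
  norm_num [lastDigit_toStr, Int.natAbs_mul, show Int.toNat 2 = 2 from rfl,
    show Int.toNat 3 = 3 from rfl, show Int.toNat 4 = 4 from rfl, show Int.toNat 5 = 5 from rfl,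
    show Int.toNat 6 = 6 from rfl, show Int.toNat 7 = 7 from rfl, show Int.toNat 8 = 8 from rfl]
  rw [show |a| * 2 % 10 = |a| % 10 * 2 % 10 from by omega, show |a| * 3 % 10 = |a| % 10 * 3 % 10 from by omega,
     show |a| * 4 % 10 = |a| % 10 * 4 % 10 from by omega, show |a| * 5 % 10 = |a| % 10 * 5 % 10 from by omega,
     show |a| * 6 % 10 = |a| % 10 * 6 % 10 from by omega, show |a| * 7 % 10 = |a| % 10 * 7 % 10 from by omega,
     show |a| * 8 % 10 = |a| % 10 * 8 % 10 from by omega, show |a| * 9 % 10 = |a| % 10 * 9 % 10 from by omega]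
  generalize hq : |a| % 10 = q
  have hq0 : 0 ≤ q := hq ▸ Int.emod_nonneg _ (by norm_num)
  have hq9 : q < 10 := hq ▸ Int.emod_lt_of_pos _ (by norm_num)
  interval_cases q <;> interval_cases r <;> decide

theorem solve_two (a r : Int) (t : List Int) :
    solve (a :: r :: t) = solve [a, r] := by
  have g0 : PySem.List.pyGet? (a :: r :: t) 0 = some a := by
    rw [PySem.List.pyGet?_zero]; rfl
  have g1 : PySem.List.pyGet? (a :: r :: t) 1 = some r := by
    rw [show (1 : Int) = ((1 : Nat) : Int) from rfl, PySem.List.pyGet?_natCast]; rfl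
  have g0' : PySem.List.pyGet? [a, r] 0 = some a := by
    rw [PySem.List.pyGet?_zero]; rfl
  have g1' : PySem.List.pyGet? [a, r] 1 = some r := by
    rw [show (1 : Int) = ((1 : Nat) : Int) from rfl, PySem.List.pyGet?_natCast]; rfl
  unfold solve
  rw [g0, g1, g0', g1']

theorem solve_alt_two (a r : Int) (t : List Int) :
    solve_alt (a :: r :: t) = solve_alt [a, r] := by
  have g0 : PySem.List.pyGet? (a :: r :: t) 0 = some a := by
    rw [PySem.List.pyGet?_zero]; rfl
  have g1 : PySem.List.pyGet? (a :: r :: t) 1 = some r := by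
    rw [show (1 : Int) = ((1 : Nat) : Int) from rfl, PySem.List.pyGet?_natCast]; rfl
  have g0' : PySem.List.pyGet? [a, r] 0 = some a := by
    rw [PySem.List.pyGet?_zero]; rfl
  have g1' : PySem.List.pyGet? [a, r] 1 = some r := by
    rw [show (1 : Int) = ((1 : Nat) : Int) from rfl, PySem.List.pyGet?_natCast]; rfl
  unfold solve_alt
  rw [g0, g1, g0', g1']

-- ===== VERDICT =====
theorem solve_spec : Claim_equal_solve := by
  unfold Claim_equal_solve
  intro s _hdom hpre
  unfold Spec_solve
  obtain ⟨hlen, hcond⟩ := hpre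
  match s, hlen with
  | a :: r :: t, _ =>
    have g1 : PySem.List.pyGet? (a :: r :: t) 1 = some r := by
      rw [show (1 : Int) = ((1 : Nat) : Int) from rfl, PySem.List.pyGet?_natCast]; rfl
    rw [g1] at hcond
    simp only [Option.getD_some] at hcond
    rw [solve_two, solve_alt_two]
    by_cases hbig : 10 ≤ r
    · rw [solve_big a r hbig, solve_alt_big a r hbig]
    · exact main_core a r (by rcases hcond with h | ⟨h, _⟩ <;> omega) (by omega)
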